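-- pv_equiv track=rewrite | github.com/UnaStankovic/BioinformaticsCourseBook | poglavlja/4/kodovi/LeaderboardCyclopeptideSequencing.py | consistent
-- ===== SOURCE A (Python) =====
-- def linear_spectrum(peptide, amino_acid, amino_acid_mass):
-- 	prefix_mass = [0]
-- 	current_mass = 0
-- 	for i in range(len(peptide)):
-- 		for j in range(20):
-- 			if amino_acid[j] == peptide[i]:
-- 				prefix_mass.append(current_mass + amino_acid_mass[j])
-- 				current_mass += amino_acid_mass[j]
--
-- 	linear_spectrum = [0]
-- 	for i in range(len(prefix_mass)):
-- 		for j in range(i+1, len(prefix_mass)):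
-- 			linear_spectrum.append(prefix_mass[j] - prefix_mass[i])
--
-- 	linear_spectrum.sort()
-- 	return linear_spectrum
--
-- def consistent(peptide, target_spectrum, amino_acid, amino_acid_mass):
-- 	peptide_linear_spectrum = linear_spectrum(peptide, amino_acid, amino_acid_mass)
--
-- 	for aa in peptide_linear_spectrum:
-- 		found = False
-- 		for aa_p in target_spectrum:
-- 			if aa_p == aa:
-- 				found = True
-- 		if found == False:
-- 			return False
--
-- 	return True
-- ===== SOURCE B (Python) =====
-- def consistent(peptide, target_spectrum, amino_acid, amino_acid_mass):
--     # Map each peptide character to the masses of every matching entry among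
--     # the first 20 amino acids (same silent skip of unknown characters as A).
--     masses = []
--     for c in peptide:
--         for j in range(20):
--             if amino_acid[j] == c:
--                 masses.append(amino_acid_mass[j])
--     target = set(target_spectrum)
--     if 0 not in target:
--         return False
--     # Every contiguous-block sum (running sum of each suffix) must be in the
--     # target spectrum; no prefix table, no sort, early exit on first miss.
--     for i in range(len(masses)):
--         s = 0
--         for k in range(i, len(masses)):
--             s += masses[k]
--             if s not in target:
--                 return False
--     return True
-- ===== Notes on version B (the rewrite author's own statement) =====
-- stated objective: alternative
-- what changed: B drops A's prefix-mass table, the explicit pairwise-difference spectrum list and its sort: it sums each contiguous block of the mass list directly with a running sum over every suffix, checks each sum against a set built once from the target spectrum, and exits early on the first miss instead of scanning the whole target list for every element of a sorted spectrum.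
import Mathlib
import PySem

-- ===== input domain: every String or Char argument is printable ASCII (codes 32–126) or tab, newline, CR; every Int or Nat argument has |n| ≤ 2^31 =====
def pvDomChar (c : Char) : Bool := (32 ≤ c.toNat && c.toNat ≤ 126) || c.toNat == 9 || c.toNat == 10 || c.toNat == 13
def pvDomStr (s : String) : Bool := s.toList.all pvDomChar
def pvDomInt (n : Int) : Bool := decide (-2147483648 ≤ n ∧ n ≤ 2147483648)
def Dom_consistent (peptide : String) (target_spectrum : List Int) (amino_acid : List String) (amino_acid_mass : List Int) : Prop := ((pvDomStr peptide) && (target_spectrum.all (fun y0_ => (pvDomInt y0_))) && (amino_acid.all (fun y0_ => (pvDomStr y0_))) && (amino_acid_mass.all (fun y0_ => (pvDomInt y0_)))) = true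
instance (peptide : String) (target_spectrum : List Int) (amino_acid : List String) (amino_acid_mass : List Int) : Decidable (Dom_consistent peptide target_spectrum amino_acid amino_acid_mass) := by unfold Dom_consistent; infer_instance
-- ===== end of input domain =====

-- B replaces A's prefix-mass table + pairwise-difference list + sort by direct running sums of every
-- suffix of the mass list, checked against a set built once from the target spectrum (objective: alternative).

-- ===== PORT A =====
-- one step of A's prefix-mass loop: the inner 'for j in range(20)' over state (prefix_mass, current_mass)
def pmStep (amino_acid : List String) (amino_acid_mass : List Int) (st : List Int × Int) (c : Char) : List Int × Int :=
  (List.range 20).foldl (fun st2 (j : Nat) =>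
    if PySem.List.pyGetD amino_acid (j : Int) "" = String.ofList [c] then
      (st2.1 ++ [st2.2 + PySem.List.pyGetD amino_acid_mass (j : Int) 0],
       st2.2 + PySem.List.pyGetD amino_acid_mass (j : Int) 0)
    else st2) st

-- A's linear_spectrum: prefix-mass table, then all pairwise differences, then sort
def linearSpectrumA (peptide : String) (amino_acid : List String) (amino_acid_mass : List Int) : List Int :=
  let pm := (peptide.toList.foldl (pmStep amino_acid amino_acid_mass) ([0], 0)).1
  let ls := (List.range pm.length).foldl (fun acc i =>
      (List.range' (i + 1) (pm.length - (i + 1))).foldl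
        (fun acc2 j => acc2 ++ [pm.getD j 0 - pm.getD i 0]) acc) [0]
  PySem.List.sorted ls (fun x => x) false

-- A's inner 'for aa_p in target_spectrum: if aa_p == aa: found = True'
def foundScanA (target_spectrum : List Int) (x : Int) : Bool :=
  target_spectrum.foldl (fun f y => if y = x then true else f) false

-- A's outer loop with its early 'return False'
def checkAllA : List Int → List Int → Bool
  | [], _ => true
  | x :: rest, ts => if foundScanA ts x = false then false else checkAllA rest ts

def consistent (peptide : String) (target_spectrum : List Int) (amino_acid : List String) (amino_acid_mass : List Int) : Bool :=
  checkAllA (linearSpectrumA peptide amino_acid amino_acid_mass) target_spectrum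

-- ===== PORT B =====
-- B's mass-list builder: the inner 'for j in range(20)' appending matching masses
def massRowB (amino_acid : List String) (amino_acid_mass : List Int) (c : Char) (acc : List Int) : List Int :=
  (List.range 20).foldl (fun acc2 (j : Nat) =>
    if PySem.List.pyGetD amino_acid (j : Int) "" = String.ofList [c] then
      acc2 ++ [PySem.List.pyGetD amino_acid_mass (j : Int) 0]
    else acc2) acc

def massesB (peptide : String) (amino_acid : List String) (amino_acid_mass : List Int) : List Int :=
  peptide.toList.foldl (fun acc c => massRowB amino_acid amino_acid_mass c acc) []

-- B's inner running-sum scan over one suffix, with its early 'return False'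
def sumScanB (tgt : PySem.Set Int) : Int → List Int → Bool
  | _, [] => true
  | s, m :: rest => if PySem.Set.contains tgt (s + m) = false then false else sumScanB tgt (s + m) rest

def consistent_alt (peptide : String) (target_spectrum : List Int) (amino_acid : List String) (amino_acid_mass : List Int) : Bool :=
  let masses := massesB peptide amino_acid amino_acid_mass
  let tgt := PySem.Set.ofList target_spectrum
  if PySem.Set.contains tgt 0 = false then false
  else (List.range masses.length).all (fun i => sumScanB tgt 0 (masses.drop i))

-- ===== PRECONDITION & SPEC =====
-- Pre_ excludes exactly the inputs where Python A raises IndexError: a non-empty peptide with fewer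
-- than 20 amino acids, or a peptide character matching amino_acid[j] with j ≥ len(amino_acid_mass).
def Pre_consistent (peptide : String) (_target_spectrum : List Int) (amino_acid : List String) (amino_acid_mass : List Int) : Prop :=
  peptide = "" ∨ (20 ≤ amino_acid.length ∧
    ∀ c ∈ peptide.toList, ∀ j < 20, amino_acid[j]? = some (String.ofList [c]) → j < amino_acid_mass.length)

instance (peptide : String) (target_spectrum : List Int) (amino_acid : List String) (amino_acid_mass : List Int) : Decidable (Pre_consistent peptide target_spectrum amino_acid amino_acid_mass) := by
  unfold Pre_consistent; infer_instance

def pvWitness_consistent : String × List Int × List String × List Int := ("", [0, 3], [], [])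

def Spec_consistent (peptide : String) (target_spectrum : List Int) (amino_acid : List String) (amino_acid_mass : List Int) (out : Bool) : Prop := out = consistent_alt peptide target_spectrum amino_acid amino_acid_mass
instance (peptide : String) (target_spectrum : List Int) (amino_acid : List String) (amino_acid_mass : List Int) (out : Bool) : Decidable (Spec_consistent peptide target_spectrum amino_acid amino_acid_mass out) := by unfold Spec_consistent; infer_instance

-- ===== CLAIM (what is proved, stated in full; the proofs are below) =====
def Claim_equal_consistent : Prop := ∀ (peptide : String) (target_spectrum : List Int) (amino_acid : List String) (amino_acid_mass : List Int), Dom_consistent peptide target_spectrum amino_acid amino_acid_mass → Pre_consistent peptide target_spectrum amino_acid amino_acid_mass → Spec_consistent peptide target_spectrum amino_acid amino_acid_mass (consistent peptide target_spectrum amino_acid amino_acid_mass)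

-- ===== LEMMAS AND PROOFS =====

-- running sums [s+m0, s+m0+m1, ...] — the common description of both spectra
def runSums : Int → List Int → List Int
  | _, [] => []
  | s, m :: r => (s + m) :: runSums (s + m) r

-- the masses contributed by one character (closed form of both inner range-20 folds)
def rowOf (amino_acid : List String) (amino_acid_mass : List Int) (c : Char) : List Int :=
  ((List.range 20).filter
      (fun (j : Nat) => PySem.List.pyGetD amino_acid (j : Int) "" = String.ofList [c])).map
    (fun (j : Nat) => PySem.List.pyGetD amino_acid_mass (j : Int) 0)

lemma all_congr_mem {α : Type} (l : List α) (p q : α → Bool) (h : ∀ a ∈ l, p a = q a) :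
    l.all p = l.all q := by
  induction l with
  | nil => rfl
  | cons a r ih =>
    simp only [List.all_cons, h a (List.mem_cons_self), ih (fun b hb => h b (List.mem_cons_of_mem a hb))]

lemma foldl_append_ite {α β : Type} (P : α → Prop) [DecidablePred P] (f : α → β) :
    ∀ (l : List α) (acc : List β),
      l.foldl (fun acc x => if P x then acc ++ [f x] else acc) acc =
        acc ++ (l.filter (fun x => P x)).map f := by
  intro l
  induction l with
  | nil => intro acc; simp
  | cons x r ih =>
    intro acc
    by_cases hx : P x
    · simp [hx, ih]
    · simp [hx, ih]

lemma runSums_length (l : List Int) : ∀ s, (runSums s l).length = l.length := by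
  induction l with
  | nil => intro s; simp [runSums]
  | cons m r ih => intro s; simp [runSums, ih]

lemma runSums_append (xs ys : List Int) : ∀ s, runSums s (xs ++ ys) = runSums s xs ++ runSums (s + xs.sum) ys := by
  induction xs with
  | nil => intro s; simp [runSums]
  | cons m r ih => intro s; simp [runSums, ih, add_assoc]

lemma runSums_getD (ms : List Int) : ∀ (s : Int) (t : Nat), t < ms.length →
    (runSums s ms).getD t 0 = s + (ms.take (t + 1)).sum := by
  induction ms with
  | nil => intro s t h; simp at h
  | cons m r ih =>
    intro s t h
    cases t with
    | zero => simp [runSums]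
    | succ t =>
      simp only [runSums, List.getD_cons_succ, List.take_succ_cons, List.sum_cons]
      rw [ih (s + m) t (by simpa using h)]
      ring

lemma runSums_eq_map (ms : List Int) : ∀ s, runSums s ms =
    (List.range ms.length).map (fun t => s + (ms.take (t + 1)).sum) := by
  induction ms with
  | nil => intro s; simp [runSums]
  | cons m r ih =>
    intro s
    simp only [runSums, List.length_cons, List.range_succ_eq_map, List.map_cons, List.map_map]
    congr 1
    · simp
    · rw [ih (s + m)]
      apply List.map_congr_left
      intro t _
      simp [add_assoc]

-- a foldl whose body appends a chunk is a flatMap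
lemma foldl_append_of_body {α β : Type} (f : List α → β → List α) (g : β → List α)
    (h : ∀ acc b, f acc b = acc ++ g b) :
    ∀ (l : List β) (init : List α), l.foldl f init = init ++ l.flatMap g := by
  intro l
  induction l with
  | nil => intro init; simp
  | cons b r ih => intro init; simp [h, ih, List.flatMap_cons]

lemma massRowB_eq (aa : List String) (aam : List Int) (c : Char) (acc : List Int) :
    massRowB aa aam c acc = acc ++ rowOf aa aam c := by
  simpa [massRowB, rowOf] using
    foldl_append_ite (fun j : Nat => PySem.List.pyGetD aa (j : Int) "" = String.ofList [c])
      (fun j : Nat => PySem.List.pyGetD aam (j : Int) 0) (List.range 20) acc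

lemma massesB_eq (p : String) (aa : List String) (aam : List Int) :
    massesB p aa aam = p.toList.flatMap (rowOf aa aam) := by
  simpa [massesB] using
    foldl_append_of_body (fun acc c => massRowB aa aam c acc) (rowOf aa aam)
      (fun acc c => massRowB_eq aa aam c acc) p.toList []

-- A's inner range-20 fold over (prefix_mass, current_mass), in closed form
lemma pmStep_eq (aa : List String) (aam : List Int) (st : List Int × Int) (c : Char) :
    pmStep aa aam st c = (st.1 ++ runSums st.2 (rowOf aa aam c), st.2 + (rowOf aa aam c).sum) := by
  have key : ∀ (js : List Nat) (pm : List Int) (cm : Int),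
      js.foldl (fun st2 (j : Nat) =>
        if PySem.List.pyGetD aa (j : Int) "" = String.ofList [c] then
          (st2.1 ++ [st2.2 + PySem.List.pyGetD aam (j : Int) 0],
           st2.2 + PySem.List.pyGetD aam (j : Int) 0)
        else st2) (pm, cm) =
      (pm ++ runSums cm (((js.filter
          (fun (j : Nat) => PySem.List.pyGetD aa (j : Int) "" = String.ofList [c])).map
          (fun (j : Nat) => PySem.List.pyGetD aam (j : Int) 0))),
       cm + ((js.filter
          (fun (j : Nat) => PySem.List.pyGetD aa (j : Int) "" = String.ofList [c])).map
          (fun (j : Nat) => PySem.List.pyGetD aam (j : Int) 0)).sum) := by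
    intro js
    induction js with
    | nil => intro pm cm; simp [runSums]
    | cons j r ih =>
      intro pm cm
      by_cases hj : PySem.List.pyGetD aa (j : Int) "" = String.ofList [c]
      · simp only [List.foldl_cons, List.filter_cons, hj, decide_true]
        rw [ih]
        simp [runSums, add_assoc]
      · simp only [List.foldl_cons, List.filter_cons, hj, decide_false]
        exact ih pm cm
  obtain ⟨pm, cm⟩ := st
  simpa [pmStep, rowOf] using key (List.range 20) pm cm

lemma pm_fold_eq (aa : List String) (aam : List Int) (cs : List Char) :
    ∀ (pm0 : List Int) (cm0 : Int),
      cs.foldl (pmStep aa aam) (pm0, cm0) =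
        (pm0 ++ runSums cm0 (cs.flatMap (rowOf aa aam)), cm0 + (cs.flatMap (rowOf aa aam)).sum) := by
  induction cs with
  | nil => intro pm0 cm0; simp [runSums]
  | cons c r ih =>
    intro pm0 cm0
    simp only [List.foldl_cons, pmStep_eq, List.flatMap_cons]
    rw [ih]
    simp [runSums_append, add_assoc]

-- A's membership scan is list membership
lemma foundScanA_eq (ts : List Int) (x : Int) : foundScanA ts x = decide (x ∈ ts) := by
  have key : ∀ (l : List Int) (b : Bool),
      l.foldl (fun f y => if y = x then true else f) b = (b || decide (x ∈ l)) := by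
    intro l
    induction l with
    | nil => intro b; simp
    | cons y r ih =>
      intro b
      simp only [List.foldl_cons]
      by_cases hy : y = x
      · rw [if_pos hy, ih]
        simp [hy]
      · rw [if_neg hy, ih]
        simp [List.mem_cons, Ne.symm hy]
  simpa [foundScanA] using key ts false

lemma checkAllA_eq (l ts : List Int) : checkAllA l ts = l.all (fun x => decide (x ∈ ts)) := by
  have h1 : checkAllA l ts = l.all (fun x => foundScanA ts x) := by
    induction l with
    | nil => rfl
    | cons x r ih =>
      simp only [checkAllA, List.all_cons]
      cases foundScanA ts x
      · simp
      · simp [ih]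
  rw [h1]
  exact all_congr_mem l _ _ (fun a _ => foundScanA_eq ts a)

-- B's running-sum scan is an 'all' over runSums
lemma sumScanB_eq (tgt : PySem.Set Int) (ms : List Int) : ∀ s,
    sumScanB tgt s ms = (runSums s ms).all (fun x => PySem.Set.contains tgt x) := by
  induction ms with
  | nil => intro s; simp [sumScanB, runSums]
  | cons m r ih =>
    intro s
    simp only [sumScanB, runSums, List.all_cons, ih]
    cases h : PySem.Set.contains tgt (s + m)
    · simp
    · simp

lemma set_contains_eq (ts : List Int) (x : Int) :
    PySem.Set.contains (PySem.Set.ofList ts) x = decide (x ∈ ts) := by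
  simp [PySem.Set.contains, PySem.Set.mem_ofList]

-- A's pairwise differences of the prefix table are the running sums of the suffixes
lemma chunk_eq (M : List Int) (i : Nat) (hi : i ≤ M.length) :
    (List.range' (i + 1) ((0 :: runSums 0 M).length - (i + 1))).map
        (fun j => (0 :: runSums 0 M).getD j 0 - (0 :: runSums 0 M).getD i 0) =
      runSums 0 (M.drop i) := by
  have hlen : (0 :: runSums 0 M).length = M.length + 1 := by
    simp [runSums_length]
  have hget : ∀ k ≤ M.length, (0 :: runSums 0 M).getD k 0 = (M.take k).sum := by
    intro k hk
    cases k with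
    | zero => simp
    | succ t =>
      simp only [List.getD_cons_succ]
      rw [runSums_getD M 0 t (by omega)]
      ring
  have hrhs : runSums 0 (M.drop i) =
      (List.range (M.length - i)).map (fun t => 0 + ((M.drop i).take (t + 1)).sum) := by
    rw [runSums_eq_map, List.length_drop]
  have hn : M.length + 1 - (i + 1) = M.length - i := by omega
  rw [hlen, hn, List.range'_eq_map_range, List.map_map, hrhs]
  apply List.map_congr_left
  intro t ht
  have ht' : t < M.length - i := List.mem_range.mp ht
  simp only [Function.comp]
  rw [hget (i + 1 + t) (by omega), hget i (by omega)]
  have htake : M.take (i + 1 + t) = M.take i ++ (M.drop i).take (t + 1) := by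
    have h2 : i + 1 + t = i + (t + 1) := by omega
    rw [h2, List.take_add]
  rw [htake, List.sum_append]
  ring

-- the common normal form of both programs
lemma consistent_eq_normal (p : String) (ts : List Int) (aa : List String) (aam : List Int) :
    consistent p ts aa aam =
      (decide ((0 : Int) ∈ ts) && (List.range (p.toList.flatMap (rowOf aa aam)).length).all
        (fun i => (runSums 0 ((p.toList.flatMap (rowOf aa aam)).drop i)).all
          (fun x => decide (x ∈ ts)))) := by
  have hpm : (p.toList.foldl (pmStep aa aam) ([0], 0)).1
      = 0 :: runSums 0 (p.toList.flatMap (rowOf aa aam)) := by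
    rw [pm_fold_eq]
    simp
  unfold consistent linearSpectrumA
  rw [hpm]
  set M := p.toList.flatMap (rowOf aa aam) with hM
  rw [checkAllA_eq, (PySem.List.sorted_perm _ _ _).all_eq]
  rw [foldl_append_of_body _
      (fun i => (List.range' (i + 1) ((0 :: runSums 0 M).length - (i + 1))).map
        (fun j => (0 :: runSums 0 M).getD j 0 - (0 :: runSums 0 M).getD i 0))
      (fun acc i => PySem.List.foldl_append_singleton_eq_map _ _ acc)]
  have hlen : (0 :: runSums 0 M).length = M.length + 1 := by
    simp [runSums_length]
  rw [hlen]
  simp only [List.all_cons, List.all_append, List.all_flatMap, List.range_succ]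
  have hlast : ((List.range' (M.length + 1) (M.length + 1 - (M.length + 1))).map
      (fun j => (0 :: runSums 0 M).getD j 0 - (0 :: runSums 0 M).getD M.length 0)).all
        (fun x => decide (x ∈ ts)) = true := by
    simp
  rw [hlast]
  have hmain : (List.range M.length).all
      (fun i => ((List.range' (i + 1) ((0 :: runSums 0 M).length - (i + 1))).map
        (fun j => (0 :: runSums 0 M).getD j 0 - (0 :: runSums 0 M).getD i 0)).all
          (fun x => decide (x ∈ ts))) =
      (List.range M.length).all
      (fun i => (runSums 0 (M.drop i)).all (fun x => decide (x ∈ ts))) := by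
    apply all_congr_mem
    intro i hi
    have hi' : i ≤ M.length := by
      have := List.mem_range.mp hi; omega
    rw [chunk_eq M i hi']
  rw [hlen] at hmain
  rw [hmain]
  simp

lemma consistent_alt_eq_normal (p : String) (ts : List Int) (aa : List String) (aam : List Int) :
    consistent_alt p ts aa aam =
      (decide ((0 : Int) ∈ ts) && (List.range (p.toList.flatMap (rowOf aa aam)).length).all
        (fun i => (runSums 0 ((p.toList.flatMap (rowOf aa aam)).drop i)).all
          (fun x => decide (x ∈ ts)))) := by
  unfold consistent_alt
  simp only [massesB_eq]
  set M := p.toList.flatMap (rowOf aa aam) with hM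
  rw [set_contains_eq]
  cases h : decide ((0 : Int) ∈ ts) with
  | false => simp
  | true =>
    simp only [Bool.true_and]
    rw [if_neg (by simp)]
    apply all_congr_mem
    intro i _
    rw [sumScanB_eq]
    exact all_congr_mem _ _ _ (fun a _ => set_contains_eq ts a)

-- ===== VERDICT (by name: the statement is the Claim_ definition above) =====
theorem consistent_spec : Claim_equal_consistent := by
  intro p ts aa aam _ _
  unfold Spec_consistent
  rw [consistent_eq_normal, consistent_alt_eq_normal]
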